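-- pv_equiv track=rewrite | github.com/omatheuspimenta/LINEs_in_Plants | code/get_domains.py | fill_consecutive_nones
-- ===== SOURCE A (Python) =====
-- def fill_consecutive_nones(input_list: list) -> list:
--     """
--     Fills consecutive None values in a list with the last repeated value.
--     This function iterates through the input list and replaces consecutive None
--     values with the last repeated value. If a None value is not part of a sequence
--     of repeated values, it remains unchanged.
--     Args:
--         input_list (list): The list containing values and None entries.
--     Returns:
--         list: A new list with consecutive None values filled with the last repeated value.
--     """
--
--     new_list = []
--     last_repeated_value = None
--
--     for i, value in enumerate(input_list):
--         if value is None: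
--             # Replace None only if it belongs to a sequence of repeated values
--             if i > 0 and input_list[i - 1] == last_repeated_value:
--                 new_list.append(last_repeated_value)
--             else:
--                 new_list.append(None)
--         else:
--             # Update the last_repeated_value only if it's part of a repeating sequence
--             if i > 0 and input_list[i - 1] == value:
--                 last_repeated_value = value
--             else:
--                 last_repeated_value = None  # Reset when encountering a new value
--             new_list.append(value)
--
--     return new_list
-- ===== SOURCE B (Python) =====
-- def fill_consecutive_nones(input_list: list) -> list:
--     """Two-stage rewrite: stage 1 run-length-encodes the list into (value, count)
--     runs; stage 2 emits each run, filling the first element of a None run with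
--     the previous run's value when that run repeated (count >= 2)."""
--     # stage 1: run-length encode
--     runs = []
--     i = 0
--     n = len(input_list)
--     while i < n:
--         j = i + 1
--         while j < n and input_list[j] == input_list[i]:
--             j += 1
--         runs.append((input_list[i], j - i))
--         i = j
--     # stage 2: emit runs
--     out = []
--     prev = None
--     for v, k in runs:
--         if v is None and prev is not None and prev[0] is not None and prev[1] >= 2:
--             out.append(prev[0])
--             out.extend([None] * (k - 1))
--         else:
--             out.extend([v] * k)
--         prev = (v, k)
--     return out
-- ===== Notes on version B (the rewrite author's own statement) =====
-- stated objective: alternative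
-- what changed: Replaced A's single stateful pass with a last_repeated_value accumulator by a two-stage algorithm: stage 1 run-length-encodes the list into (value, count) runs, stage 2 emits each run, filling the first element of a None run with the previous run's value exactly when that previous run is non-None with count >= 2.
import Mathlib
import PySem

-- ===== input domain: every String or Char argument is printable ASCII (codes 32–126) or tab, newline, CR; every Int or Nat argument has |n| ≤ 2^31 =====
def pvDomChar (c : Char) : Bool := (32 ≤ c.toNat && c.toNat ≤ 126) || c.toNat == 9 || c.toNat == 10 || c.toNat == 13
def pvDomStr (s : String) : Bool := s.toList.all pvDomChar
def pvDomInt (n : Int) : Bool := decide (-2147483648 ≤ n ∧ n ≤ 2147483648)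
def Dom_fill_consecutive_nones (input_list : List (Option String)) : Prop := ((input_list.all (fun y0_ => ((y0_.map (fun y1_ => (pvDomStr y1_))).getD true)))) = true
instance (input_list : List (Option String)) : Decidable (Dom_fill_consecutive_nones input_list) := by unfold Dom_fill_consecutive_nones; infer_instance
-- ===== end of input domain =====

-- B replaces A's single stateful pass (last_repeated_value accumulator) by a two-stage
-- algorithm: run-length encoding, then run-by-run emission (objective: alternative);
-- both programs are total and their return values agree on every input.

-- ===== PORT A =====
-- A's loop body: state is (new_list, last_repeated_value); iv is (i, value) from enumerate.
-- Python's short-circuited 'i > 0 and input_list[i-1] == …' is ported with pyGetD, whose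
-- value at i-1 = -1 is irrelevant because the 'i > 0' conjunct is false there (exact).
def fcnStepA (full : List (Option String)) (st : List (Option String) × Option String)
    (iv : Int × Option String) : List (Option String) × Option String :=
  match iv.2 with
  | none =>
      if iv.1 > 0 ∧ PySem.List.pyGetD full (iv.1 - 1) none = st.2 then
        (st.1 ++ [st.2], st.2)
      else
        (st.1 ++ [none], st.2)
  | some v =>
      if iv.1 > 0 ∧ PySem.List.pyGetD full (iv.1 - 1) none = some v then
        (st.1 ++ [some v], some v)
      else
        (st.1 ++ [some v], none)

def fill_consecutive_nones (input_list : List (Option String)) : List (Option String) :=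
  (List.foldl (fcnStepA input_list) ([], none) (PySem.List.enumerate input_list 0)).1

-- ===== PORT B =====
-- B's stage 1 (the two while loops): the inner while counts how far the run of elements
-- equal to the run's first element extends (takeWhile), the outer while records the run
-- and continues after it.
def fcnRle (l : List (Option String)) : List (Option String × Nat) :=
  match l with
  | [] => []
  | x :: xs =>
      let k := (xs.takeWhile (fun y => y == x)).length
      (x, k + 1) :: fcnRle (xs.drop k)
termination_by l.length
decreasing_by simp

-- B's stage 2 (the for loop over runs): prev is the previously emitted run (None before
-- the first run); a None run whose predecessor run is non-None with count >= 2 gets its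
-- first element filled with the predecessor's value.
def fcnBlock (prev : Option (Option String × Nat)) (v : Option String) (k : Nat) :
    List (Option String) :=
  match v, prev with
  | none, some (some pv, pn) =>
      if 2 ≤ pn then some pv :: List.replicate (k - 1) none
      else List.replicate k (none : Option String)
  | _, _ => List.replicate k v

def fcnEmit (prev : Option (Option String × Nat)) (runs : List (Option String × Nat)) :
    List (Option String) :=
  match runs with
  | [] => []
  | (v, k) :: rest => fcnBlock prev v k ++ fcnEmit (some (v, k)) rest

def fill_consecutive_nones_alt (input_list : List (Option String)) : List (Option String) :=
  fcnEmit none (fcnRle input_list)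

-- ===== PRECONDITION & SPEC =====
def Spec_fill_consecutive_nones (input_list : List (Option String)) (out : List (Option String)) : Prop := out = fill_consecutive_nones_alt input_list
instance (input_list : List (Option String)) (out : List (Option String)) : Decidable (Spec_fill_consecutive_nones input_list out) := by unfold Spec_fill_consecutive_nones; infer_instance

-- ===== CLAIM (what is proved, stated in full; the proofs are below) =====
def Claim_equal_fill_consecutive_nones : Prop := ∀ (input_list : List (Option String)), Dom_fill_consecutive_nones input_list → Spec_fill_consecutive_nones input_list (fill_consecutive_nones input_list)

-- ===== LEMMAS AND PROOFS =====

-- Common yardstick both ports are proved equal to: the value at position i, decided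
-- from the local window (i-2, i-1, i) of the original list.
def fcnCell (full : List (Option String)) (iv : Int × Option String) : Option String :=
  if 2 ≤ iv.1 ∧ iv.2 = none ∧ PySem.List.pyGetD full (iv.1 - 1) none ≠ none
      ∧ PySem.List.pyGetD full (iv.1 - 1) none = PySem.List.pyGetD full (iv.1 - 2) none then
    PySem.List.pyGetD full (iv.1 - 1) none
  else
    iv.2

-- Loop invariant on A's accumulator: when the previous element is non-None, lrv equals it
-- exactly when that element is a repeat of the one before it.
def fcnInv (full : List (Option String)) (j : Nat) (lrv : Option String) : Prop :=
  PySem.List.pyGetD full ((j : Int) - 1) none ≠ none →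
    (lrv = PySem.List.pyGetD full ((j : Int) - 1) none ↔
      2 ≤ (j : Int) ∧
        PySem.List.pyGetD full ((j : Int) - 2) none = PySem.List.pyGetD full ((j : Int) - 1) none)

lemma fcn_step_fst (full : List (Option String)) (j : Nat) (x : Option String)
    (acc : List (Option String)) (lrv : Option String)
    (hinv : fcnInv full j lrv) :
    (fcnStepA full (acc, lrv) ((j : Int), x)).1 = acc ++ [fcnCell full ((j : Int), x)] := by
  cases x with
  | some v =>
      simp only [fcnStepA, fcnCell]
      split_ifs <;> simp_all
  | none =>
      simp only [fcnStepA, fcnCell]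
      split_ifs with hA hB hB
      · rw [hA.2]
      · cases hlrv : lrv with
        | none => simp_all
        | some v =>
            exfalso
            have hne : PySem.List.pyGetD full ((j : Int) - 1) none ≠ none := by
              rw [hA.2, hlrv]; simp
            have h2 := (hinv hne).mp (by rw [hA.2])
            have hP' := h2.2.symm
            exact hB (by tauto)
      · exfalso
        rcases hB with ⟨h2, -, hne, hP⟩
        have hl := (hinv hne).mpr ⟨h2, hP.symm⟩
        exact hA ⟨by omega, hl.symm⟩
      · rfl

lemma fcn_step_inv (full : List (Option String)) (j : Nat) (x : Option String)
    (acc : List (Option String)) (lrv : Option String)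
    (hx : PySem.List.pyGetD full (j : Int) none = x) :
    fcnInv full (j + 1) (fcnStepA full (acc, lrv) ((j : Int), x)).2 := by
  have hc1 : ((j + 1 : Nat) : Int) - 1 = (j : Int) := by push_cast; ring
  have hc2 : ((j + 1 : Nat) : Int) - 2 = (j : Int) - 1 := by push_cast; ring
  cases x with
  | none =>
      intro hne
      rw [hc1, hx] at hne
      exact absurd rfl hne
  | some v =>
      unfold fcnInv
      rw [hc1, hc2, hx]
      intro _
      simp only [fcnStepA]
      split_ifs with h
      · exact ⟨fun _ => ⟨by omega, h.2⟩, fun _ => rfl⟩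
      · constructor
        · intro hcon; exact absurd hcon (by simp)
        · intro ⟨h2, hP⟩; exact absurd ⟨by omega, hP⟩ h

lemma fcn_loop (full : List (Option String)) :
    ∀ (rest : List (Option String)) (j : Nat) (acc : List (Option String)) (lrv : Option String),
      full.drop j = rest → fcnInv full j lrv →
      (List.foldl (fcnStepA full) (acc, lrv) (PySem.List.enumerate rest (j : Int))).1
        = acc ++ (PySem.List.enumerate rest (j : Int)).map (fcnCell full) := by
  intro rest
  induction rest with
  | nil => intro j acc lrv _ _; simp [PySem.List.enumerate]
  | cons x rest' ih =>
      intro j acc lrv hdrop hinv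
      have hj : full[j]? = some x := by
        have h0 := congrArg (fun l => l[0]?) hdrop
        simpa using h0
      have hx : PySem.List.pyGetD full (j : Int) none = x := by
        simp [PySem.List.pyGetD_natCast, List.getD_eq_getElem?_getD, hj]
      have hdrop' : full.drop (j + 1) = rest' := by
        rw [← List.tail_drop, hdrop]
        rfl
      have hcast : (j : Int) + 1 = ((j + 1 : Nat) : Int) := by push_cast; ring
      rw [PySem.List.enumerate_cons, List.foldl_cons, List.map_cons, hcast]
      have hst : fcnStepA full (acc, lrv) ((j : Int), x)
          = ((fcnStepA full (acc, lrv) ((j : Int), x)).1,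
             (fcnStepA full (acc, lrv) ((j : Int), x)).2) := rfl
      rw [hst, fcn_step_fst full j x acc lrv hinv,
        ih (j + 1) _ _ hdrop' (fcn_step_inv full j x acc lrv hx)]
      rw [List.append_assoc, List.singleton_append]

lemma fcn_inv_zero (full : List (Option String)) : fcnInv full 0 none := by
  intro hne
  constructor
  · intro h; exact absurd h.symm hne
  · intro h; omega

-- fcnCell is the identity whenever the predecessor equals the element itself
-- (the interior of a run).
lemma fcn_cell_self (full : List (Option String)) (i : Int) (v : Option String)
    (h : PySem.List.pyGetD full (i - 1) none = v) : fcnCell full (i, v) = v := by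
  cases v with
  | none => simp [fcnCell, h]
  | some w => simp [fcnCell]

-- The window map is the identity on the interior of a run: every element of t equals x,
-- t sits in full starting at position q ≥ 1, and the element at q-1 is x as well.
lemma fcn_run_interior (full : List (Option String)) (x : Option String) :
    ∀ (t tail : List (Option String)) (q : Nat),
      1 ≤ q → full.drop q = t ++ tail → (∀ y ∈ t, y = x) →
      full.getD (q - 1) none = x →
      (PySem.List.enumerate t ((q : Nat) : Int)).map (fcnCell full) = t := by
  intro t
  induction t with
  | nil => intro tail q _ _ _ _; simp [PySem.List.enumerate]
  | cons y t' ih =>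
      intro tail q hq hdrop hall hpred
      have hy : y = x := hall y (by simp)
      have hget : full.getD q none = y := by
        have h0 := congrArg (fun l => l.getD 0 none) hdrop
        simpa [List.getD_eq_getElem?_getD, List.getElem?_drop] using h0
      have hpy : PySem.List.pyGetD full ((q : Int) + 1 - 1) none = y := by
        have : (q : Int) + 1 - 1 = ((q : Nat) : Int) := by ring
        rw [this, PySem.List.pyGetD_natCast]
        exact hget
      rw [PySem.List.enumerate_cons, List.map_cons]
      have hcell : fcnCell full (((q : Nat) : Int), y) = y := by
        apply fcn_cell_self
        have hc : ((q : Nat) : Int) - 1 = ((q - 1 : Nat) : Int) := by omega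
        rw [hc, PySem.List.pyGetD_natCast, hpred, hy]
      have hdrop' : full.drop (q + 1) = t' ++ tail := by
        rw [← List.tail_drop, hdrop]; rfl
      have hpred' : full.getD (q + 1 - 1) none = x := by
        simpa [hy] using hget
      have hcast : ((q : Nat) : Int) + 1 = (((q + 1 : Nat)) : Int) := by push_cast; ring
      rw [hcell, hcast, ih tail (q + 1) (by omega) hdrop' (fun z hz => hall z (by simp [hz])) hpred']

-- Invariant carried through B's emission loop, relating prev to the original list.
def fcnEmitInv (full rest : List (Option String)) (p : Nat)
    (prev : Option (Option String × Nat)) : Prop :=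
  full.drop p = rest ∧
  match prev with
  | none => p = 0
  | some (pv, pn) =>
      0 < p ∧ 1 ≤ pn ∧ pv = full.getD (p - 1) none ∧
      (2 ≤ pn ↔ (2 ≤ p ∧ full.getD (p - 2) none = pv)) ∧
      (∀ y ys, rest = y :: ys → y ≠ pv)

lemma fcn_emit_eq (full : List (Option String)) :
    ∀ (rest : List (Option String)) (p : Nat) (prev : Option (Option String × Nat)),
      fcnEmitInv full rest p prev →
      fcnEmit prev (fcnRle rest) = (PySem.List.enumerate rest ((p : Nat) : Int)).map (fcnCell full) := by
  intro rest
  induction rest using fcnRle.induct with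
  | case1 => intro p prev _; simp [fcnRle, fcnEmit, PySem.List.enumerate]
  | case2 x xs k ih =>
      intro p prev hinv
      obtain ⟨hdrop, hprev⟩ := hinv
      -- run structure
      set t := xs.takeWhile (fun y => y == x) with ht
      have hkt : k = t.length := rfl
      have hxs : t ++ xs.dropWhile (fun y => y == x) = xs := List.takeWhile_append_dropWhile
      set d := xs.dropWhile (fun y => y == x) with hd
      have hdropk : xs.drop k = d := by
        conv_lhs => rw [← hxs]
        rw [hkt, List.drop_left]
      have htall : ∀ y ∈ t, y = x := by
        intro y hy
        have := List.mem_takeWhile_imp hy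
        simpa using this
      have hdhead : ∀ y ys, d = y :: ys → y ≠ x := by
        intro y ys hyd
        have := List.head?_dropWhile_not (fun y => y == x) xs
        rw [← hd, hyd] at this
        simpa using this
      -- positions of the run in full
      have hget : ∀ j, full.getD (p + j) none = (x :: xs).getD j none := by
        intro j
        have h0 := congrArg (fun l => l.getD j none) hdrop
        simpa [List.getD_eq_getElem?_getD, List.getElem?_drop] using h0
      have hgetp : full.getD p none = x := by simpa using hget 0
      have hdropt : full.drop (p + 1) = t ++ d := by
        rw [← List.tail_drop, hdrop]
        simpa using hxs.symm
      -- the interior of the run maps to itself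
      have hinterior :
          (PySem.List.enumerate t (((p + 1 : Nat)) : Int)).map (fcnCell full) = t :=
        fcn_run_interior full x t d (p + 1) (by omega) hdropt htall (by simpa using hgetp)
      have ht_repl : t = List.replicate t.length x := List.eq_replicate_of_mem htall
      -- elements of the run inside xs
      have hxsj : ∀ j, j < t.length → xs.getD j none = x := by
        intro j hj
        rw [← hxs, List.getD_eq_getElem?_getD, List.getElem?_append_left hj,
          List.getElem?_eq_getElem hj]
        exact htall _ (List.getElem_mem hj)
      have hconsj : ∀ j, j ≤ t.length → (x :: xs).getD j none = x := by
        intro j hj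
        cases j with
        | zero => rfl
        | succ j' => exact hxsj j' (by omega)
      -- new invariant for the tail
      have hlastrun : full.getD (p + k) none = x :=
        (hget k).trans (hconsj k (by omega))
      have hinv' : fcnEmitInv full d (p + k + 1) (some (x, k + 1)) := by
        refine ⟨?_, ?_, by omega, ?_, ?_, ?_⟩
        · rw [← hdropk]
          have h := congrArg (List.drop (k + 1)) hdrop
          rw [List.drop_drop, ← Nat.add_assoc] at h
          simpa using h
        · omega
        · simpa using hlastrun.symm
        · constructor
          · intro h2
            refine ⟨by omega, ?_⟩
            have : full.getD (p + (k - 1)) none = x :=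
              (hget (k - 1)).trans (hconsj (k - 1) (by omega))
            have hc : p + k + 1 - 2 = p + (k - 1) := by omega
            rw [hc, this]
          · intro ⟨h2, heq⟩
            by_contra hk0
            have hk0' : k = 0 := by omega
            rcases Nat.eq_zero_or_pos p with hp0 | hppos
            · omega
            · obtain ⟨pv, pn, rfl⟩ : ∃ pv pn, prev = some (pv, pn) := by
                match prev, hprev with
                | none, hprev => omega
                | some (pv, pn), _ => exact ⟨pv, pn, rfl⟩
              obtain ⟨-, -, hpv, -, hbound⟩ := hprev
              have hxne : x ≠ pv := hbound x xs rfl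
              have hc : p + k + 1 - 2 = p - 1 := by omega
              rw [hc, ← hpv] at heq
              exact hxne heq.symm
        · intro y ys hyd
          exact hdhead y ys hyd
      have hinv'' : fcnEmitInv full (xs.drop k) (p + k + 1) (some (x, k + 1)) := by
        rw [hdropk]; exact hinv'
      -- assemble
      rw [fcnRle]
      simp only [← ht]
      rw [fcnEmit]
      have hxs' : x :: xs = (x :: t) ++ xs.drop k := by
        rw [hdropk]; simp [← hxs]
      have hlen : (((p : Nat)) : Int) + ((x :: t).length : Int) = (((p + k + 1 : Nat)) : Int) := by
        simp only [List.length_cons, hkt]; omega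
      rw [hxs', PySem.List.enumerate_append, List.map_append, hlen,
        ih (p + k + 1) (some (x, k + 1)) hinv'']
      congr 1
      rw [PySem.List.enumerate_cons, List.map_cons,
        show ((p : Nat) : Int) + 1 = (((p + 1 : Nat) : Int)) from by omega, hinterior]
      -- head cell vs block
      rcases Nat.eq_zero_or_pos p with hp0 | hppos
      · subst hp0
        have hcell : fcnCell full ((((0 : Nat)) : Int), x) = x := by
          simp [fcnCell]
        have : prev = none := by
          match prev, hprev with
          | none, _ => rfl
          | some (pv, pn), hprev => omega
        subst this
        cases x <;> simp only [fcnBlock] <;> rw [List.replicate_succ, hcell, ← ht_repl]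
      · obtain ⟨pv, pn, rfl⟩ : ∃ pv pn, prev = some (pv, pn) := by
          match prev, hprev with
          | none, hprev => omega
          | some (pv, pn), _ => exact ⟨pv, pn, rfl⟩
        obtain ⟨-, -, hpv, hiff, hbound⟩ := hprev
        have hxne : x ≠ pv := hbound x xs rfl
        have hpy1 : PySem.List.pyGetD full (((p : Nat) : Int) - 1) none = pv := by
          have hc : ((p : Nat) : Int) - 1 = ((p - 1 : Nat) : Int) := by omega
          rw [hc, PySem.List.pyGetD_natCast]
          exact hpv.symm
        cases x with
        | some w =>
            have hcell : fcnCell full (((p : Nat) : Int), some w) = some w := by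
              simp [fcnCell]
            simp only [fcnBlock]
            rw [List.replicate_succ, hcell, ← ht_repl]
        | none =>
            -- x = none, so pv ≠ none
            obtain ⟨pw, rfl⟩ : ∃ pw, pv = some pw := by
              cases pv with
              | none => exact absurd rfl hxne
              | some pw => exact ⟨pw, rfl⟩
            have hcell : fcnCell full (((p : Nat) : Int), none)
                = if 2 ≤ pn then some pw else none := by
              by_cases h2 : 2 ≤ pn
              · have hcond := hiff.mp h2
                have hpy2 : PySem.List.pyGetD full (((p : Nat) : Int) - 2) none = some pw := by
                  have hc : ((p : Nat) : Int) - 2 = ((p - 2 : Nat) : Int) := by omega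
                  rw [hc, PySem.List.pyGetD_natCast]
                  exact hcond.2
                simp [fcnCell, hpy1, hpy2, h2]
                omega
              · have hnc : ¬ (2 ≤ ((p : Nat) : Int) ∧ full.getD (p - 2) none = some pw) := by
                  intro hc
                  exact h2 (hiff.mpr ⟨by omega, hc.2⟩)
                simp [fcnCell, hpy1, h2]
                intro hp2 hpy2
                exfalso
                apply hnc
                refine ⟨by omega, ?_⟩
                have hc : ((p : Nat) : Int) - 2 = ((p - 2 : Nat) : Int) := by omega
                rw [hc, PySem.List.pyGetD_natCast] at hpy2
                exact hpy2.symm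
            simp only [fcnBlock]
            by_cases h2 : 2 ≤ pn
            · rw [if_pos h2] at hcell
              rw [if_pos h2, hcell, Nat.add_sub_cancel]
              congr 1
              exact ht_repl.symm
            · rw [if_neg h2] at hcell
              rw [if_neg h2, hcell, List.replicate_succ]
              congr 1
              exact ht_repl.symm

-- ===== VERDICT (by name: the statement is the Claim_ definition above) =====
theorem fill_consecutive_nones_spec : Claim_equal_fill_consecutive_nones := by
  intro input_list _
  unfold Spec_fill_consecutive_nones fill_consecutive_nones fill_consecutive_nones_alt
  have hA := fcn_loop input_list input_list 0 [] none (by simp) (fcn_inv_zero input_list)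
  have hB := fcn_emit_eq input_list input_list 0 none ⟨by simp, rfl⟩
  simp only [Nat.cast_zero, List.nil_append] at hA hB
  rw [hA, hB]
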